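-- pv_equiv track=rewrite | github.com/thomasvincent/gps-genealogy-agents | src/gps_agents/genealogy_crawler/ocr/agents.py | _is_header_line
-- ===== SOURCE A (Python) =====
-- def _is_header_line(text: str) -> bool:
--     """Check if line appears to be a header."""
--     header_keywords = [
--         "name", "age", "sex", "color", "race",
--         "occupation", "birthplace", "relation",
--         "schedule", "enumeration", "district",
--     ]
--     text_lower = text.lower()
--     return any(kw in text_lower for kw in header_keywords)
-- ===== SOURCE B (Python) =====
-- def _is_header_line(text: str) -> bool:
--     """Check if line appears to be a header."""
--     header_keywords = [
--         "name", "age", "sex", "color", "race",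
--         "occupation", "birthplace", "relation",
--         "schedule", "enumeration", "district",
--     ]
--     # Position-driven single scan: at each position, test whether some
--     # keyword starts there (lowercasing only the slice under test).
--     for i in range(len(text)):
--         for kw in header_keywords:
--             if text[i:i + len(kw)].lower() == kw:
--                 return True
--     return False
-- ===== Notes on version B (the rewrite author's own statement) =====
-- stated objective: alternative
-- what changed: Instead of lowercasing the whole line and running a separate substring search per keyword, B scans positions once and at each position compares the lowercased slice against each keyword, so no full-string lowercase copy and no repeated whole-string scans.
import Mathlib
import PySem

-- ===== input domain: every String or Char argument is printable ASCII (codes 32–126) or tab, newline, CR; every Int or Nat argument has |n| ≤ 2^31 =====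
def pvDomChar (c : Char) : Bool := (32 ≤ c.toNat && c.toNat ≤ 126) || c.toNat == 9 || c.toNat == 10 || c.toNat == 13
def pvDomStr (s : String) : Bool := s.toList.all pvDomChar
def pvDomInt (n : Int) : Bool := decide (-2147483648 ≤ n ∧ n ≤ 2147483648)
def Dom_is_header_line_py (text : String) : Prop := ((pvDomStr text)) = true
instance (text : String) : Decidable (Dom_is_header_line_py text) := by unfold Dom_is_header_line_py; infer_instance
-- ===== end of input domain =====

-- B scans positions once, comparing a lowercased slice per keyword, instead of
-- A's per-keyword substring search in a fully lowercased copy (alternative decomposition).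

-- ===== PORT A =====
def headerKeywords : List String :=
  ["name", "age", "sex", "color", "race",
   "occupation", "birthplace", "relation",
   "schedule", "enumeration", "district"]

def is_header_line_py (text : String) : Bool :=
  let text_lower := PySem.Str.lower text
  headerKeywords.any (fun kw => PySem.Str.isIn kw text_lower)

-- ===== PORT B =====
def altKeywords : List (List Char) :=
  ["name".toList, "age".toList, "sex".toList, "color".toList, "race".toList,
   "occupation".toList, "birthplace".toList, "relation".toList,
   "schedule".toList, "enumeration".toList, "district".toList]

-- text[i:i+len(kw)].lower() == kw, with the suffix text[i:] as argument
def altMatch (s : List Char) (kw : List Char) : Bool :=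
  PySem.Chars.lower (s.take kw.length) == kw

-- the loop over positions i, as recursion over suffixes
def altScan : List Char → Bool
  | [] => false
  | c :: rest => altKeywords.any (altMatch (c :: rest)) || altScan rest

def is_header_line_py_alt (text : String) : Bool := altScan text.toList

-- ===== PRECONDITION & SPEC =====
def Spec_is_header_line_py (text : String) (out : Bool) : Prop := out = is_header_line_py_alt text
instance (text : String) (out : Bool) : Decidable (Spec_is_header_line_py text out) := by unfold Spec_is_header_line_py; infer_instance

-- ===== CLAIM (what is proved, stated in full; the proofs are below) =====
def Claim_equal_is_header_line_py : Prop := ∀ (text : String), Dom_is_header_line_py text → Spec_is_header_line_py text (is_header_line_py text)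

-- ===== LEMMAS AND PROOFS =====

theorem altMatch_iff (s kw : List Char) :
    altMatch s kw = true ↔ kw <+: PySem.Chars.lower s := by
  unfold altMatch
  rw [beq_iff_eq, List.prefix_iff_eq_take]
  have h : List.take kw.length (PySem.Chars.lower s) = PySem.Chars.lower (List.take kw.length s) := by
    simp [PySem.Chars.lower, List.map_take]
  rw [h]
  exact ⟨fun h => h.symm, fun h => h.symm⟩

theorem altScan_iff (s : List Char) :
    altScan s = true ↔ ∃ kw ∈ altKeywords, ∃ j, kw <+: List.drop j (PySem.Chars.lower s) := by
  induction s with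
  | nil =>
    constructor
    · intro h; simp [altScan] at h
    · rintro ⟨kw, hkw, j, hpre⟩
      have hk : kw = [] := by simpa [PySem.Chars.lower] using hpre
      subst hk
      exact absurd hkw (by decide)
  | cons c rest ih =>
    simp only [altScan, Bool.or_eq_true, List.any_eq_true, ih, altMatch_iff]
    constructor
    · rintro (⟨kw, hkw, hpre⟩ | ⟨kw, hkw, j, hpre⟩)
      · exact ⟨kw, hkw, 0, by simpa using hpre⟩
      · exact ⟨kw, hkw, j + 1, by simpa [PySem.Chars.lower] using hpre⟩
    · rintro ⟨kw, hkw, j, hpre⟩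
      cases j with
      | zero => exact Or.inl ⟨kw, hkw, by simpa using hpre⟩
      | succ j => exact Or.inr ⟨kw, hkw, j, by simpa [PySem.Chars.lower] using hpre⟩

theorem a_iff (text : String) : is_header_line_py text = true ↔
    ∃ kw ∈ altKeywords, ∃ j, kw <+: List.drop j (PySem.Chars.lower text.toList) := by
  simp only [is_header_line_py, List.any_eq_true]
  constructor
  · rintro ⟨kw, hkw, hin⟩
    have h2 : PySem.Chars.isIn kw.toList (PySem.Chars.lower text.toList) = true := by
      simpa using hin
    obtain ⟨j, hj⟩ := (PySem.Chars.exists_prefix_drop_iff_isIn _ _).mpr h2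
    refine ⟨kw.toList, ?_, j, hj⟩
    fin_cases hkw <;> decide
  · rintro ⟨kw, hkw, j, hj⟩
    have hkw' : ∃ kws ∈ headerKeywords, kws.toList = kw := by fin_cases hkw <;> decide
    obtain ⟨kws, hkws, rfl⟩ := hkw'
    refine ⟨kws, hkws, ?_⟩
    have h2 := (PySem.Chars.exists_prefix_drop_iff_isIn _ _).mp ⟨j, hj⟩
    simpa using h2

-- ===== VERDICT (by name: the statement is the Claim_ definition above) =====
theorem is_header_line_py_spec : Claim_equal_is_header_line_py := by
  intro text _
  unfold Spec_is_header_line_py is_header_line_py_alt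
  exact Bool.eq_iff_iff.mpr (by rw [a_iff, altScan_iff])
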